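-- pv_equiv track=rewrite | github.com/danikforcsgo-dot/Import-Project | elliott_backtest_1d.py | build_zigzag
-- ===== SOURCE A (Python) =====
-- ZZ_DEPTH       = 5
--
-- def build_zigzag(highs, lows, depth=ZZ_DEPTH):
--     pivots = []
--     n = len(highs)
--     last_type = None
--     last_idx  = 0
--
--     for i in range(depth, n - depth):
--         is_high = all(highs[i] >= highs[i-j] for j in range(1, depth+1)) and \
--                   all(highs[i] >= highs[i+j] for j in range(1, depth+1))
--         is_low  = all(lows[i]  <= lows[i-j]  for j in range(1, depth+1)) and \
--                   all(lows[i]  <= lows[i+j]   for j in range(1, depth+1))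
--
--         if is_high and last_type != 'H':
--             if pivots and pivots[-1][1] == 'H':
--                 if highs[i] > pivots[-1][2]:
--                     pivots[-1] = (i, 'H', highs[i])
--             else:
--                 pivots.append((i, 'H', highs[i]))
--             last_type = 'H'
--             last_idx  = i
--         elif is_low and last_type != 'L':
--             if pivots and pivots[-1][1] == 'L':
--                 if lows[i] < pivots[-1][2]:
--                     pivots[-1] = (i, 'L', lows[i])
--             else:
--                 pivots.append((i, 'L', lows[i]))
--             last_type = 'L'
--             last_idx  = i
--
--     return pivots
-- ===== SOURCE B (Python) =====
-- ZZ_DEPTH = 5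
--
-- def _prefix_scan(xs, w, better):
--     # pre[e] = better-fold of xs over [block_start(e) .. e], blocks of width w
--     pre = []
--     m = 0
--     for e in range(len(xs)):
--         m = xs[e] if e % w == 0 else better(m, xs[e])
--         pre.append(m)
--     return pre
--
-- def _suffix_scan(xs, w, better):
--     # suf[s] = better-fold of xs over [s .. min(block_end(s), len(xs)-1)]
--     n = len(xs)
--     suf = [0] * n
--     for s in range(n - 1, -1, -1):
--         if s % w == w - 1 or s == n - 1:
--             suf[s] = xs[s]
--         else:
--             suf[s] = better(xs[s], suf[s + 1])
--     return suf
--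
-- def build_zigzag(highs, lows, depth=ZZ_DEPTH):
--     n = len(highs)
--     w = 2 * depth + 1
--     pre_h = _prefix_scan(highs, w, max)
--     suf_h = _suffix_scan(highs, w, max)
--     pre_l = _prefix_scan(lows, w, min)
--     suf_l = _suffix_scan(lows, w, min)
--
--     pivots = []
--     last_type = None
--     for i in range(depth, n - depth):
--         # window [i-depth, i+depth] extremum via the two block scans (O(1) per i)
--         is_high = highs[i] >= suf_h[i - depth] and highs[i] >= pre_h[i + depth]
--         is_low  = lows[i]  <= suf_l[i - depth] and lows[i]  <= pre_l[i + depth]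
--
--         if is_high and last_type != 'H':
--             if pivots and pivots[-1][1] == 'H':
--                 if highs[i] > pivots[-1][2]:
--                     pivots[-1] = (i, 'H', highs[i])
--             else:
--                 pivots.append((i, 'H', highs[i]))
--             last_type = 'H'
--         elif is_low and last_type != 'L':
--             if pivots and pivots[-1][1] == 'L':
--                 if lows[i] < pivots[-1][2]:
--                     pivots[-1] = (i, 'L', lows[i])
--             else:
--                 pivots.append((i, 'L', lows[i]))
--             last_type = 'L'
--
--     return pivots
-- ===== Notes on version B (the rewrite author's own statement) =====
-- stated objective: alternative
-- what changed: The per-index rescan of the 2*depth-wide window (four all(...) generator scans) is replaced by O(1) lookups into per-block prefix/suffix running max (highs) and min (lows) arrays precomputed in two linear passes per series; the pivot-merge loop is unchanged. B trades A's data-dependent short-circuiting for a fixed O(n) bound independent of depth.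
-- outside the precondition, e.g. on build_zigzag([1, 2, 3], [9, 0], 0): A returns [(0, 'H', 1), (1, 'L', 0), (2, 'H', 3)], B raises IndexError
import Mathlib
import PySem

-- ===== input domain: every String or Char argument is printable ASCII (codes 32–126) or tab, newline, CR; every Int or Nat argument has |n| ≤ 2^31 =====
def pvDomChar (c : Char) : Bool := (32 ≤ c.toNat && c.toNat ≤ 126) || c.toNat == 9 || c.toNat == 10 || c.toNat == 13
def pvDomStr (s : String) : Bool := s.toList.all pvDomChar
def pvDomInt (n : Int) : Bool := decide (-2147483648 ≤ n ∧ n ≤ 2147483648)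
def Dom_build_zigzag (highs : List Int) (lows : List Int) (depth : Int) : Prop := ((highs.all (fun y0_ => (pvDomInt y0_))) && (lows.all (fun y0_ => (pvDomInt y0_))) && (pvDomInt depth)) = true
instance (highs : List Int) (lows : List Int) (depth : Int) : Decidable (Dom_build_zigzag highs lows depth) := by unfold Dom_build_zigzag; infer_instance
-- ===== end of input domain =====

-- B replaces A's per-index rescan of the 2*depth-wide window by O(1) lookups into
-- precomputed per-block prefix/suffix running max (highs) / min (lows) arrays; the
-- pivot-merge loop is unchanged.


-- ===== PORT A =====
-- loop body of A's 'for i in range(depth, n - depth)'; state = (pivots, last_type, last_idx)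
-- ('pivots and pivots[-1] ...' is rendered through getLast?; 'pivots[-1] = x' is dropLast ++ [x])
def zzStepA (highs : List Int) (lows : List Int) (depth : Int)
    (st : List (Int × String × Int) × Option String × Int) (i : Int) :
    List (Int × String × Int) × Option String × Int :=
  let pivots := st.1
  let lastType := st.2.1
  let lastIdx := st.2.2
  let is_high := ((PySem.List.pyRange 1 (depth+1) 1).all
        (fun j => decide (PySem.List.pyGetD highs i 0 ≥ PySem.List.pyGetD highs (i - j) 0)))
      && ((PySem.List.pyRange 1 (depth+1) 1).all
        (fun j => decide (PySem.List.pyGetD highs i 0 ≥ PySem.List.pyGetD highs (i + j) 0)))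
  let is_low := ((PySem.List.pyRange 1 (depth+1) 1).all
        (fun j => decide (PySem.List.pyGetD lows i 0 ≤ PySem.List.pyGetD lows (i - j) 0)))
      && ((PySem.List.pyRange 1 (depth+1) 1).all
        (fun j => decide (PySem.List.pyGetD lows i 0 ≤ PySem.List.pyGetD lows (i + j) 0)))
  if is_high && !(lastType == some "H") then
    (match pivots.getLast? with
     | some p =>
        if p.2.1 == "H" then
          (if p.2.2 < PySem.List.pyGetD highs i 0 then
             pivots.dropLast ++ [(i, "H", PySem.List.pyGetD highs i 0)]
           else pivots)
        else pivots ++ [(i, "H", PySem.List.pyGetD highs i 0)]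
     | none => pivots ++ [(i, "H", PySem.List.pyGetD highs i 0)],
     some "H", i)
  else if is_low && !(lastType == some "L") then
    (match pivots.getLast? with
     | some p =>
        if p.2.1 == "L" then
          (if PySem.List.pyGetD lows i 0 < p.2.2 then
             pivots.dropLast ++ [(i, "L", PySem.List.pyGetD lows i 0)]
           else pivots)
        else pivots ++ [(i, "L", PySem.List.pyGetD lows i 0)]
     | none => pivots ++ [(i, "L", PySem.List.pyGetD lows i 0)],
     some "L", i)
  else (pivots, lastType, lastIdx)

def build_zigzag (highs : List Int) (lows : List Int) (depth : Int) : List (Int × String × Int) :=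
  let n : Int := PySem.List.len highs
  ((PySem.List.pyRange depth (n - depth) 1).foldl (zzStepA highs lows depth) ([], none, 0)).1

-- ===== PORT B =====
-- _prefix_scan of Source B: pre[e] = xs[e] if e % w == 0 else better(m, xs[e]); Nat indices are
-- exact on the Pre_ domain (depth ≥ 0, so w ≥ 1 and Python's e % w is Nat's %).
def preGo (xs : List Int) (w : Nat) (f : Int → Int → Int) (s : Nat) (m : Int) : List Int :=
  if _h : s < xs.length then
    let m' := if s % w = 0 then xs.getD s 0 else f m (xs.getD s 0)
    m' :: preGo xs w f (s+1) m'
  else []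
termination_by xs.length - s

-- _suffix_scan of Source B: suf[s] filled from s = n-1 down to 0 using suf[s+1]; ported as the
-- recursion producing the suffix of the array from position s (suf[s+1] is the head of the tail).
def sufGo (xs : List Int) (w : Nat) (f : Int → Int → Int) (s : Nat) : List Int :=
  if _h : s < xs.length then
    let rest := sufGo xs w f (s+1)
    (if s % w = w - 1 ∨ s = xs.length - 1 then xs.getD s 0
     else f (xs.getD s 0) (rest.headD 0)) :: rest
  else []
termination_by xs.length - s

-- loop body of Source B's merge loop; state = (pivots, last_type)
def zzStepB (highs : List Int) (lows : List Int) (depth : Int)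
    (sufH preH sufL preL : List Int)
    (st : List (Int × String × Int) × Option String) (i : Int) :
    List (Int × String × Int) × Option String :=
  let pivots := st.1
  let lastType := st.2
  let is_high := decide (PySem.List.pyGetD highs i 0 ≥ PySem.List.pyGetD sufH (i - depth) 0)
      && decide (PySem.List.pyGetD highs i 0 ≥ PySem.List.pyGetD preH (i + depth) 0)
  let is_low := decide (PySem.List.pyGetD lows i 0 ≤ PySem.List.pyGetD sufL (i - depth) 0)
      && decide (PySem.List.pyGetD lows i 0 ≤ PySem.List.pyGetD preL (i + depth) 0)
  if is_high && !(lastType == some "H") then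
    (match pivots.getLast? with
     | some p =>
        if p.2.1 == "H" then
          (if p.2.2 < PySem.List.pyGetD highs i 0 then
             pivots.dropLast ++ [(i, "H", PySem.List.pyGetD highs i 0)]
           else pivots)
        else pivots ++ [(i, "H", PySem.List.pyGetD highs i 0)]
     | none => pivots ++ [(i, "H", PySem.List.pyGetD highs i 0)],
     some "H")
  else if is_low && !(lastType == some "L") then
    (match pivots.getLast? with
     | some p =>
        if p.2.1 == "L" then
          (if PySem.List.pyGetD lows i 0 < p.2.2 then
             pivots.dropLast ++ [(i, "L", PySem.List.pyGetD lows i 0)]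
           else pivots)
        else pivots ++ [(i, "L", PySem.List.pyGetD lows i 0)]
     | none => pivots ++ [(i, "L", PySem.List.pyGetD lows i 0)],
     some "L")
  else (pivots, lastType)

def build_zigzag_alt (highs : List Int) (lows : List Int) (depth : Int) : List (Int × String × Int) :=
  let n : Int := PySem.List.len highs
  let w : Nat := (2 * depth + 1).toNat
  let preH := preGo highs w max 0 0
  let sufH := sufGo highs w max 0
  let preL := preGo lows w min 0 0
  let sufL := sufGo lows w min 0
  ((PySem.List.pyRange depth (n - depth) 1).foldl
      (zzStepB highs lows depth sufH preH sufL preL) ([], none)).1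

-- ===== PRECONDITION & SPEC =====
-- A raises IndexError when depth < 0 (the loop indices leave the lists), and may raise
-- IndexError when lows is shorter than highs and the pivot loop is nonempty; Pre_
-- conservatively requires lows at least as long as highs whenever the loop is nonempty, which
-- also excludes some inputs where A's lazily-evaluated low-window test happens to stop before
-- the out-of-range access (see the cite in claim.json).
def Pre_build_zigzag (highs : List Int) (lows : List Int) (depth : Int) : Prop :=
  0 ≤ depth ∧ (PySem.List.len highs ≤ 2 * depth ∨ PySem.List.len highs ≤ PySem.List.len lows)
instance (highs : List Int) (lows : List Int) (depth : Int) : Decidable (Pre_build_zigzag highs lows depth) := by unfold Pre_build_zigzag; infer_instance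

def pvWitness_build_zigzag : List Int × List Int × Int :=
  ([1, 3, 2, 1, 2, 4, 1], [0, 2, 1, 0, 1, 3, 0], 1)

def Spec_build_zigzag (highs : List Int) (lows : List Int) (depth : Int) (out : List (Int × String × Int)) : Prop := out = build_zigzag_alt highs lows depth
instance (highs : List Int) (lows : List Int) (depth : Int) (out : List (Int × String × Int)) : Decidable (Spec_build_zigzag highs lows depth out) := by unfold Spec_build_zigzag; infer_instance

-- ===== CLAIM (what is proved, stated in full; the proofs are below) =====
def Claim_equal_build_zigzag : Prop := ∀ (highs : List Int) (lows : List Int) (depth : Int), Dom_build_zigzag highs lows depth → Pre_build_zigzag highs lows depth → Spec_build_zigzag highs lows depth (build_zigzag highs lows depth)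

-- ===== LEMMAS AND PROOFS =====

lemma pyGetD_toNat (xs : List Int) (i : Int) (h0 : 0 ≤ i) (h1 : i < (xs.length : Int)) :
    PySem.List.pyGetD xs i 0 = xs.getD i.toNat 0 := by
  rw [PySem.List.pyGetD_eq_getElem xs 0 h0 h1, List.getD_eq_getElem xs 0 (by omega)]

lemma getD_zero_eq_headD (l : List Int) : l.getD 0 0 = l.headD 0 := by
  cases l <;> rfl

-- fold of f over the segment xs[a..b] (inclusive index interval), seeded with xs[a]
def segFold (f : Int → Int → Int) (xs : List Int) (a b : Nat) : Int :=
  (List.range' (a+1) (b-a)).foldl (fun acc k => f acc (xs.getD k 0)) (xs.getD a 0)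

lemma segFold_self (f : Int → Int → Int) (xs : List Int) (a : Nat) :
    segFold f xs a a = xs.getD a 0 := by
  simp [segFold]

lemma segFold_right (f : Int → Int → Int) (xs : List Int) {a b : Nat} (h : a ≤ b) :
    segFold f xs a (b+1) = f (segFold f xs a b) (xs.getD (b+1) 0) := by
  have h1 : b + 1 - a = (b - a) + 1 := by omega
  rw [segFold, h1, List.range'_1_concat, List.foldl_append,
    show a + 1 + (b - a) = b + 1 by omega]
  rfl

lemma segFold_left (f : Int → Int → Int) (hf : ∀ x y z, f (f x y) z = f x (f y z))
    (xs : List Int) {a b : Nat} (h : a < b) :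
    segFold f xs a b = f (xs.getD a 0) (segFold f xs (a+1) b) := by
  induction b with
  | zero => omega
  | succ b ih =>
    rcases Nat.lt_or_ge a b with hab | hab
    · rw [segFold_right f xs (by omega), ih hab, hf,
        ← segFold_right f xs (by omega)]
    · have hba : b = a := by omega
      subst hba
      rw [segFold_right f xs (le_refl b), segFold_self f xs b, segFold_self f xs (b+1)]

lemma segFold_max_le' (xs : List Int) (c : Int) :
    ∀ (d a : Nat), (segFold max xs a (a+d) ≤ c ↔ ∀ k, a ≤ k → k ≤ a + d → xs.getD k 0 ≤ c) := by
  intro d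
  induction d with
  | zero =>
    intro a
    rw [Nat.add_zero, segFold_self]
    constructor
    · intro hc k hk1 hk2
      have hk : k = a := by omega
      simpa [hk] using hc
    · intro hk; exact hk a (le_refl a) (le_refl a)
  | succ d ih =>
    intro a
    rw [show a + (d + 1) = (a + d) + 1 by omega, segFold_right max xs (by omega),
      max_le_iff, ih a]
    constructor
    · rintro ⟨h1, h2⟩ k hk1 hk2
      rcases Nat.lt_or_ge k (a + d + 1) with hk | hk
      · exact h1 k hk1 (by omega)
      · have hk' : k = a + d + 1 := by omega
        simpa [hk'] using h2
    · intro hk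
      exact ⟨fun k hk1 hk2 => hk k hk1 (by omega), hk (a + d + 1) (by omega) (le_refl _)⟩

lemma segFold_max_le (xs : List Int) {a b : Nat} (h : a ≤ b) (c : Int) :
    segFold max xs a b ≤ c ↔ ∀ k, a ≤ k → k ≤ b → xs.getD k 0 ≤ c := by
  have hx := segFold_max_le' xs c (b - a) a
  rw [show a + (b - a) = b by omega] at hx
  exact hx

lemma le_segFold_min' (xs : List Int) (c : Int) :
    ∀ (d a : Nat), (c ≤ segFold min xs a (a+d) ↔ ∀ k, a ≤ k → k ≤ a + d → c ≤ xs.getD k 0) := by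
  intro d
  induction d with
  | zero =>
    intro a
    rw [Nat.add_zero, segFold_self]
    constructor
    · intro hc k hk1 hk2
      have hk : k = a := by omega
      simpa [hk] using hc
    · intro hk; exact hk a (le_refl a) (le_refl a)
  | succ d ih =>
    intro a
    rw [show a + (d + 1) = (a + d) + 1 by omega, segFold_right min xs (by omega),
      le_min_iff, ih a]
    constructor
    · rintro ⟨h1, h2⟩ k hk1 hk2
      rcases Nat.lt_or_ge k (a + d + 1) with hk | hk
      · exact h1 k hk1 (by omega)
      · have hk' : k = a + d + 1 := by omega
        simpa [hk'] using h2
    · intro hk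
      exact ⟨fun k hk1 hk2 => hk k hk1 (by omega), hk (a + d + 1) (by omega) (le_refl _)⟩

lemma le_segFold_min (xs : List Int) {a b : Nat} (h : a ≤ b) (c : Int) :
    c ≤ segFold min xs a b ↔ ∀ k, a ≤ k → k ≤ b → c ≤ xs.getD k 0 := by
  have hx := le_segFold_min' xs c (b - a) a
  rw [show a + (b - a) = b by omega] at hx
  exact hx

-- length of the scans
lemma preGo_length (xs : List Int) (w : Nat) (f : Int → Int → Int) :
    ∀ (fuel s : Nat) (m : Int), xs.length - s ≤ fuel →
      (preGo xs w f s m).length = xs.length - s := by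
  intro fuel
  induction fuel with
  | zero =>
    intro s m hs
    rw [preGo, dif_neg (by omega)]
    simp; omega
  | succ fuel ih =>
    intro s m hs
    by_cases h : s < xs.length
    · rw [preGo, dif_pos h]
      simp only [List.length_cons, ih (s+1) _ (by omega)]
      omega
    · rw [preGo, dif_neg h]
      simp; omega

lemma sufGo_length (xs : List Int) (w : Nat) (f : Int → Int → Int) :
    ∀ (fuel s : Nat), xs.length - s ≤ fuel →
      (sufGo xs w f s).length = xs.length - s := by
  intro fuel
  induction fuel with
  | zero =>
    intro s hs
    rw [sufGo, dif_neg (by omega)]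
    simp; omega
  | succ fuel ih =>
    intro s hs
    by_cases h : s < xs.length
    · rw [sufGo, dif_pos h]
      simp only [List.length_cons, ih (s+1) (by omega)]
      omega
    · rw [sufGo, dif_neg h]
      simp; omega

-- the value written at step s of the prefix scan is the fold over the current block so far
lemma preStep_val (xs : List Int) (w : Nat) (f : Int → Int → Int) (s : Nat) (m : Int)
    (hm : s % w ≠ 0 → m = segFold f xs (s - s % w) (s - 1)) :
    (if s % w = 0 then xs.getD s 0 else f m (xs.getD s 0)) = segFold f xs (s - s % w) s := by
  by_cases h0 : s % w = 0
  · simp [h0, segFold_self]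
  · have hp : 0 < s % w := Nat.pos_of_ne_zero h0
    have hle : s % w ≤ s := Nat.mod_le s w
    obtain ⟨t, rfl⟩ : ∃ t, s = t + 1 := ⟨s - 1, by omega⟩
    have hle' : (t + 1) % w ≤ t + 1 := Nat.mod_le (t + 1) w
    rw [if_neg h0, hm h0, Nat.add_sub_cancel]
    exact (segFold_right f xs (show t + 1 - (t + 1) % w ≤ t by omega)).symm

lemma preGo_getD (xs : List Int) (w : Nat) (f : Int → Int → Int) (hw : 0 < w) :
    ∀ (k s : Nat) (m : Int), s + k < xs.length →
      (s % w ≠ 0 → m = segFold f xs (s - s % w) (s - 1)) →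
      (preGo xs w f s m).getD k 0 = segFold f xs ((s+k) - (s+k) % w) (s+k) := by
  intro k
  induction k with
  | zero =>
    intro s m hs hm
    rw [preGo, dif_pos (by omega)]
    simpa using preStep_val xs w f s m hm
  | succ k ih =>
    intro s m hs hm
    rw [preGo, dif_pos (by omega)]
    simp only [List.getD_cons_succ]
    have hm' : (s+1) % w ≠ 0 →
        (if s % w = 0 then xs.getD s 0 else f m (xs.getD s 0)) =
          segFold f xs ((s+1) - (s+1) % w) ((s+1) - 1) := by
      intro h1
      have hw1 : 1 < w := by
        rcases Nat.lt_or_ge 1 w with h | h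
        · exact h
        · have hww : w = 1 := by omega
          exact absurd (by simp [hww, Nat.mod_one]) h1
      have hmo : s % w < w := Nat.mod_lt s hw
      have hne : s % w ≠ w - 1 := by
        intro hEq
        apply h1
        rw [Nat.add_mod, Nat.mod_eq_of_lt hw1, hEq, show w - 1 + 1 = w by omega, Nat.mod_self]
      have hsw : (s+1) % w = s % w + 1 := by
        rw [Nat.add_mod, Nat.mod_eq_of_lt hw1]
        exact Nat.mod_eq_of_lt (by omega)
      rw [hsw, Nat.add_sub_cancel, show s + 1 - (s % w + 1) = s - s % w by omega]
      exact preStep_val xs w f s m hm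
    rw [ih (s+1) _ (by omega) hm', show s + 1 + k = s + (k + 1) by omega]

-- head of the suffix scan at position s: fold of f over [s .. min(block_end(s), n-1)]
lemma sufGo_head (xs : List Int) (w : Nat) (f : Int → Int → Int) (hw : 0 < w)
    (hf : ∀ x y z, f (f x y) z = f x (f y z)) :
    ∀ (fuel s : Nat), xs.length - s ≤ fuel → s < xs.length →
      (sufGo xs w f s).headD 0 =
        segFold f xs s (min (s - s % w + (w - 1)) (xs.length - 1)) := by
  intro fuel
  induction fuel with
  | zero => intro s hs hlt; omega
  | succ fuel ih =>
    intro s hs hlt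
    have hmo : s % w < w := Nat.mod_lt s hw
    have hms : s % w ≤ s := Nat.mod_le s w
    rw [sufGo, dif_pos hlt]
    by_cases hc : s % w = w - 1 ∨ s = xs.length - 1
    · rw [List.headD_cons, if_pos hc]
      rcases hc with hc | hc
      · rw [show min (s - s % w + (w - 1)) (xs.length - 1) = s by omega, segFold_self]
      · rw [show min (s - s % w + (w - 1)) (xs.length - 1) = s by omega, segFold_self]
    · have hc1 : s % w ≠ w - 1 := fun h => hc (Or.inl h)
      have hc2 : s ≠ xs.length - 1 := fun h => hc (Or.inr h)
      have hw1 : 1 < w := by omega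
      have hlt1 : s + 1 < xs.length := by omega
      rw [List.headD_cons, if_neg hc, ih (s+1) (by omega) hlt1]
      have hsw : (s+1) % w = s % w + 1 := by
        rw [Nat.add_mod, Nat.mod_eq_of_lt hw1]
        exact Nat.mod_eq_of_lt (by omega)
      rw [hsw, show s + 1 - (s % w + 1) = s - s % w by omega]
      exact (segFold_left f hf xs (by omega)).symm

lemma sufGo_getD (xs : List Int) (w : Nat) (f : Int → Int → Int) (hw : 0 < w)
    (hf : ∀ x y z, f (f x y) z = f x (f y z)) :
    ∀ (k s : Nat), s + k < xs.length →
      (sufGo xs w f s).getD k 0 =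
        segFold f xs (s+k) (min ((s+k) - (s+k) % w + (w - 1)) (xs.length - 1)) := by
  intro k
  induction k with
  | zero =>
    intro s hs
    rw [getD_zero_eq_headD, sufGo_head xs w f hw hf (xs.length) s (by omega) (by omega)]
    simp
  | succ k ih =>
    intro s hs
    rw [sufGo, dif_pos (by omega)]
    simp only [List.getD_cons_succ]
    rw [ih (s+1) (by omega), show s + 1 + k = s + (k + 1) by omega]

-- arithmetic of the two blocks covering the window [s, e], e = s + (w-1), w = 2d+1
lemma block_cover {d w s e n : Nat} (hw : w = 2*d+1) (he : e = s + 2*d) (hen : e < n) :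
    s ≤ min (s - s % w + (w-1)) (n-1) ∧ min (s - s % w + (w-1)) (n-1) ≤ e ∧
    s ≤ e - e % w ∧ e - e % w ≤ e ∧ e - e % w ≤ min (s - s % w + (w-1)) (n-1) + 1 := by
  have hw0 : 0 < w := by omega
  have hqr : w * (s / w) + s % w = s := Nat.div_add_mod s w
  have hmo : s % w < w := Nat.mod_lt s hw0
  have hms : s % w ≤ s := Nat.mod_le s w
  by_cases h0 : s % w = 0
  · have hem : e % w = w - 1 := by
      rw [show e = (w - 1) + w * (s / w) by omega, Nat.add_mul_mod_self_left]
      exact Nat.mod_eq_of_lt (by omega)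
    omega
  · have hmul : w * (s / w + 1) = w * (s / w) + w := by ring
    have hem : e % w = s % w - 1 := by
      rw [show e = (s % w - 1) + w * (s / w + 1) by omega, Nat.add_mul_mod_self_left]
      exact Nat.mod_eq_of_lt (by omega)
    omega

-- ===== window-test characterisations =====

-- A's pair of all(...) scans over highs says: xs[i] is ≥ everything in the window
lemma highA_iff (xs : List Int) (depth i : Int) (hd : 0 ≤ depth) (hi : depth ≤ i)
    (hlen : i + depth < (xs.length : Int)) :
    (((PySem.List.pyRange 1 (depth+1) 1).all
        (fun j => decide (PySem.List.pyGetD xs i 0 ≥ PySem.List.pyGetD xs (i - j) 0)))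
      && ((PySem.List.pyRange 1 (depth+1) 1).all
        (fun j => decide (PySem.List.pyGetD xs i 0 ≥ PySem.List.pyGetD xs (i + j) 0)))) = true ↔
    (∀ k : Nat, i.toNat - depth.toNat ≤ k → k ≤ i.toNat + depth.toNat →
      xs.getD k 0 ≤ xs.getD i.toNat 0) := by
  rw [Bool.and_eq_true, List.all_eq_true, List.all_eq_true]
  have hgi : PySem.List.pyGetD xs i 0 = xs.getD i.toNat 0 :=
    pyGetD_toNat xs i (by omega) (by omega)
  constructor
  · rintro ⟨h1, h2⟩ k hk1 hk2
    rcases Nat.lt_trichotomy k i.toNat with hk | hk | hk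
    · have hj := h1 ((i : Int) - k) (by rw [PySem.List.mem_pyRange_one]; omega)
      rw [decide_eq_true_iff, hgi, show i - (i - (k : Int)) = (k : Int) by ring,
        pyGetD_toNat xs k (by omega) (by omega)] at hj
      simpa using hj
    · subst hk; rfl
    · have hj := h2 ((k : Int) - i) (by rw [PySem.List.mem_pyRange_one]; omega)
      rw [decide_eq_true_iff, hgi, show i + ((k : Int) - i) = (k : Int) by ring,
        pyGetD_toNat xs k (by omega) (by omega)] at hj
      simpa using hj
  · intro h
    constructor
    · intro j hj
      rw [PySem.List.mem_pyRange_one] at hj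
      rw [decide_eq_true_iff, hgi,
        pyGetD_toNat xs (i - j) (by omega) (by omega)]
      exact h (i - j).toNat (by omega) (by omega)
    · intro j hj
      rw [PySem.List.mem_pyRange_one] at hj
      rw [decide_eq_true_iff, hgi,
        pyGetD_toNat xs (i + j) (by omega) (by omega)]
      exact h (i + j).toNat (by omega) (by omega)

lemma lowA_iff (xs : List Int) (depth i : Int) (hd : 0 ≤ depth) (hi : depth ≤ i)
    (hlen : i + depth < (xs.length : Int)) :
    (((PySem.List.pyRange 1 (depth+1) 1).all
        (fun j => decide (PySem.List.pyGetD xs i 0 ≤ PySem.List.pyGetD xs (i - j) 0)))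
      && ((PySem.List.pyRange 1 (depth+1) 1).all
        (fun j => decide (PySem.List.pyGetD xs i 0 ≤ PySem.List.pyGetD xs (i + j) 0)))) = true ↔
    (∀ k : Nat, i.toNat - depth.toNat ≤ k → k ≤ i.toNat + depth.toNat →
      xs.getD i.toNat 0 ≤ xs.getD k 0) := by
  rw [Bool.and_eq_true, List.all_eq_true, List.all_eq_true]
  have hgi : PySem.List.pyGetD xs i 0 = xs.getD i.toNat 0 :=
    pyGetD_toNat xs i (by omega) (by omega)
  constructor
  · rintro ⟨h1, h2⟩ k hk1 hk2
    rcases Nat.lt_trichotomy k i.toNat with hk | hk | hk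
    · have hj := h1 ((i : Int) - k) (by rw [PySem.List.mem_pyRange_one]; omega)
      rw [decide_eq_true_iff, hgi, show i - (i - (k : Int)) = (k : Int) by ring,
        pyGetD_toNat xs k (by omega) (by omega)] at hj
      simpa using hj
    · subst hk; rfl
    · have hj := h2 ((k : Int) - i) (by rw [PySem.List.mem_pyRange_one]; omega)
      rw [decide_eq_true_iff, hgi, show i + ((k : Int) - i) = (k : Int) by ring,
        pyGetD_toNat xs k (by omega) (by omega)] at hj
      simpa using hj
  · intro h
    constructor
    · intro j hj
      rw [PySem.List.mem_pyRange_one] at hj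
      rw [decide_eq_true_iff, hgi,
        pyGetD_toNat xs (i - j) (by omega) (by omega)]
      exact h (i - j).toNat (by omega) (by omega)
    · intro j hj
      rw [PySem.List.mem_pyRange_one] at hj
      rw [decide_eq_true_iff, hgi,
        pyGetD_toNat xs (i + j) (by omega) (by omega)]
      exact h (i + j).toNat (by omega) (by omega)

-- B's two O(1) lookups say the same thing (highs / max version)
lemma highB_iff (xs : List Int) (depth i : Int) (hd : 0 ≤ depth) (hi : depth ≤ i)
    (hlen : i + depth < (xs.length : Int)) :
    ((decide (PySem.List.pyGetD xs i 0 ≥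
        PySem.List.pyGetD (sufGo xs ((2*depth+1).toNat) max 0) (i - depth) 0))
      && (decide (PySem.List.pyGetD xs i 0 ≥
        PySem.List.pyGetD (preGo xs ((2*depth+1).toNat) max 0 0) (i + depth) 0))) = true ↔
    (∀ k : Nat, i.toNat - depth.toNat ≤ k → k ≤ i.toNat + depth.toNat →
      xs.getD k 0 ≤ xs.getD i.toNat 0) := by
  set w : Nat := (2*depth+1).toNat with hwdef
  have hw : w = 2 * depth.toNat + 1 := by omega
  have hw0 : 0 < w := by omega
  set s : Nat := i.toNat - depth.toNat with hsdef
  set e : Nat := i.toNat + depth.toNat with hedef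
  have hse : e = s + 2 * depth.toNat := by omega
  have hen : e < xs.length := by omega
  have hsufLen : (sufGo xs w max 0).length = xs.length :=
    by simpa using sufGo_length xs w max (xs.length) 0 (by omega)
  have hpreLen : (preGo xs w max 0 0).length = xs.length :=
    by simpa using preGo_length xs w max (xs.length) 0 0 (by omega)
  have hsuf : PySem.List.pyGetD (sufGo xs w max 0) (i - depth) 0 =
      segFold max xs s (min (s - s % w + (w - 1)) (xs.length - 1)) := by
    rw [pyGetD_toNat _ (i - depth) (by omega) (by omega)]
    have := sufGo_getD xs w max hw0 (fun x y z => max_assoc x y z) ((i - depth).toNat) 0 (by omega)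
    simpa [show (i - depth).toNat = s by omega] using this
  have hpre : PySem.List.pyGetD (preGo xs w max 0 0) (i + depth) 0 =
      segFold max xs (e - e % w) e := by
    rw [pyGetD_toNat _ (i + depth) (by omega) (by omega)]
    have := preGo_getD xs w max hw0 ((i + depth).toNat) 0 0 (by omega) (by simp)
    simpa [show (i + depth).toNat = e by omega] using this
  have hgi : PySem.List.pyGetD xs i 0 = xs.getD i.toNat 0 :=
    pyGetD_toNat xs i (by omega) (by omega)
  obtain ⟨hb1, hb2, hb3, hb4, hb5⟩ :=
    block_cover (d := depth.toNat) (w := w) (s := s) (e := e) (n := xs.length) hw hse hen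
  rw [Bool.and_eq_true, decide_eq_true_iff, decide_eq_true_iff, hgi, hsuf, hpre,
    ge_iff_le, ge_iff_le,
    segFold_max_le xs hb1 (xs.getD i.toNat 0),
    segFold_max_le xs hb4 (xs.getD i.toNat 0)]
  constructor
  · rintro ⟨h1, h2⟩ k hk1 hk2
    by_cases hk : k ≤ min (s - s % w + (w - 1)) (xs.length - 1)
    · exact h1 k hk1 hk
    · exact h2 k (by omega) hk2
  · intro h
    exact ⟨fun k hk1 hk2 => h k hk1 (by omega), fun k hk1 hk2 => h k (by omega) hk2⟩

-- B's two O(1) lookups (lows / min version)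
lemma lowB_iff (xs : List Int) (depth i : Int) (hd : 0 ≤ depth) (hi : depth ≤ i)
    (hlen : i + depth < (xs.length : Int)) :
    ((decide (PySem.List.pyGetD xs i 0 ≤
        PySem.List.pyGetD (sufGo xs ((2*depth+1).toNat) min 0) (i - depth) 0))
      && (decide (PySem.List.pyGetD xs i 0 ≤
        PySem.List.pyGetD (preGo xs ((2*depth+1).toNat) min 0 0) (i + depth) 0))) = true ↔
    (∀ k : Nat, i.toNat - depth.toNat ≤ k → k ≤ i.toNat + depth.toNat →
      xs.getD i.toNat 0 ≤ xs.getD k 0) := by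
  set w : Nat := (2*depth+1).toNat with hwdef
  have hw : w = 2 * depth.toNat + 1 := by omega
  have hw0 : 0 < w := by omega
  set s : Nat := i.toNat - depth.toNat with hsdef
  set e : Nat := i.toNat + depth.toNat with hedef
  have hse : e = s + 2 * depth.toNat := by omega
  have hen : e < xs.length := by omega
  have hsufLen : (sufGo xs w min 0).length = xs.length :=
    by simpa using sufGo_length xs w min (xs.length) 0 (by omega)
  have hpreLen : (preGo xs w min 0 0).length = xs.length :=
    by simpa using preGo_length xs w min (xs.length) 0 0 (by omega)
  have hsuf : PySem.List.pyGetD (sufGo xs w min 0) (i - depth) 0 =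
      segFold min xs s (min (s - s % w + (w - 1)) (xs.length - 1)) := by
    rw [pyGetD_toNat _ (i - depth) (by omega) (by omega)]
    have := sufGo_getD xs w min hw0 (fun x y z => min_assoc x y z) ((i - depth).toNat) 0 (by omega)
    simpa [show (i - depth).toNat = s by omega] using this
  have hpre : PySem.List.pyGetD (preGo xs w min 0 0) (i + depth) 0 =
      segFold min xs (e - e % w) e := by
    rw [pyGetD_toNat _ (i + depth) (by omega) (by omega)]
    have := preGo_getD xs w min hw0 ((i + depth).toNat) 0 0 (by omega) (by simp)
    simpa [show (i + depth).toNat = e by omega] using this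
  have hgi : PySem.List.pyGetD xs i 0 = xs.getD i.toNat 0 :=
    pyGetD_toNat xs i (by omega) (by omega)
  obtain ⟨hb1, hb2, hb3, hb4, hb5⟩ :=
    block_cover (d := depth.toNat) (w := w) (s := s) (e := e) (n := xs.length) hw hse hen
  rw [Bool.and_eq_true, decide_eq_true_iff, decide_eq_true_iff, hgi, hsuf, hpre,
    le_segFold_min xs hb1 (xs.getD i.toNat 0),
    le_segFold_min xs hb4 (xs.getD i.toNat 0)]
  constructor
  · rintro ⟨h1, h2⟩ k hk1 hk2
    by_cases hk : k ≤ min (s - s % w + (w - 1)) (xs.length - 1)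
    · exact h1 k hk1 hk
    · exact h2 k (by omega) hk2
  · intro h
    exact ⟨fun k hk1 hk2 => h k hk1 (by omega), fun k hk1 hk2 => h k (by omega) hk2⟩

-- the two merge loops agree step by step once the window tests agree
lemma foldl_proj (L : List Int)
    (sA : List (Int × String × Int) × Option String × Int → Int →
      List (Int × String × Int) × Option String × Int)
    (sB : List (Int × String × Int) × Option String → Int →
      List (Int × String × Int) × Option String)
    (h : ∀ st i, i ∈ L → ((sA st i).1, (sA st i).2.1) = sB (st.1, st.2.1) i) :
    ∀ st, (L.foldl sA st).1 = (L.foldl sB (st.1, st.2.1)).1 := by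
  induction L with
  | nil => intro st; rfl
  | cons a L ih =>
    intro st
    simp only [List.foldl_cons]
    rw [← h st a (List.mem_cons_self)]
    exact ih (fun st i hi => h st i (List.mem_cons_of_mem a hi)) (sA st a)

lemma step_proj (highs lows : List Int) (depth : Int)
    (st : List (Int × String × Int) × Option String × Int) (i : Int)
    (hd : 0 ≤ depth) (hi : depth ≤ i)
    (hlh : i + depth < (highs.length : Int)) (hll : i + depth < (lows.length : Int)) :
    ((zzStepA highs lows depth st i).1, (zzStepA highs lows depth st i).2.1) =
      zzStepB highs lows depth
        (sufGo highs ((2*depth+1).toNat) max 0) (preGo highs ((2*depth+1).toNat) max 0 0)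
        (sufGo lows ((2*depth+1).toNat) min 0) (preGo lows ((2*depth+1).toNat) min 0 0)
        (st.1, st.2.1) i := by
  have hH : (((PySem.List.pyRange 1 (depth+1) 1).all
        (fun j => decide (PySem.List.pyGetD highs i 0 ≥ PySem.List.pyGetD highs (i - j) 0)))
      && ((PySem.List.pyRange 1 (depth+1) 1).all
        (fun j => decide (PySem.List.pyGetD highs i 0 ≥ PySem.List.pyGetD highs (i + j) 0)))) =
      ((decide (PySem.List.pyGetD highs i 0 ≥
        PySem.List.pyGetD (sufGo highs ((2*depth+1).toNat) max 0) (i - depth) 0))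
      && (decide (PySem.List.pyGetD highs i 0 ≥
        PySem.List.pyGetD (preGo highs ((2*depth+1).toNat) max 0 0) (i + depth) 0))) :=
    Bool.coe_iff_coe.mp
      ((highA_iff highs depth i hd hi hlh).trans (highB_iff highs depth i hd hi hlh).symm)
  have hL : (((PySem.List.pyRange 1 (depth+1) 1).all
        (fun j => decide (PySem.List.pyGetD lows i 0 ≤ PySem.List.pyGetD lows (i - j) 0)))
      && ((PySem.List.pyRange 1 (depth+1) 1).all
        (fun j => decide (PySem.List.pyGetD lows i 0 ≤ PySem.List.pyGetD lows (i + j) 0)))) =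
      ((decide (PySem.List.pyGetD lows i 0 ≤
        PySem.List.pyGetD (sufGo lows ((2*depth+1).toNat) min 0) (i - depth) 0))
      && (decide (PySem.List.pyGetD lows i 0 ≤
        PySem.List.pyGetD (preGo lows ((2*depth+1).toNat) min 0 0) (i + depth) 0))) :=
    Bool.coe_iff_coe.mp
      ((lowA_iff lows depth i hd hi hll).trans (lowB_iff lows depth i hd hi hll).symm)
  simp only [zzStepA, zzStepB]
  rw [hH, hL]
  split_ifs <;> rfl

-- ===== VERDICT (by name: the statement is the Claim_ definition above) =====
theorem build_zigzag_spec : Claim_equal_build_zigzag := by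
  intro highs lows depth _hdom hpre
  obtain ⟨hd, hlen⟩ := hpre
  unfold Spec_build_zigzag build_zigzag build_zigzag_alt
  simp only [PySem.List.len_eq] at *
  refine (foldl_proj _ _ _ ?_ ([], none, 0)).trans rfl
  intro st i hi
  rw [PySem.List.mem_pyRange_one] at hi
  have hll : i + depth < (lows.length : Int) := by
    rcases hlen with h | h
    · omega
    · omega
  exact step_proj highs lows depth st i hd (by omega) (by omega) hll
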